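-- pv_equiv track=rewrite | github.com/ShentuYvlv/wuying | src/wuying/device/adb.py | _is_recoverable_shell_failure
-- ===== SOURCE A (Python) =====
-- def _is_recoverable_shell_failure(message: str) -> bool:
--     normalized = message.lower()
--     return any(
--         marker in normalized
--         for marker in (
--             "command timed out",
--             "device offline",
--             "device unauthorized",
--             "device not found",
--             "closed",
--             "connection reset",
--             "cannot connect",
--         )
--     )
-- ===== SOURCE B (Python) =====
-- _MARKERS = (
--     "command timed out",
--     "device offline",
--     "device unauthorized",
--     "device not found",
--     "closed",
--     "connection reset",
--     "cannot connect",
-- )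
--
--
-- def _is_recoverable_shell_failure(message: str) -> bool:
--     # One left-to-right scan over positions of the lowered message: at each
--     # offset, test whether some marker starts there (instead of a separate
--     # full substring search per marker).
--     s = message.lower()
--     for i in range(len(s) + 1):
--         if any(s.startswith(m, i) for m in _MARKERS):
--             return True
--     return False
-- ===== Notes on version B (the rewrite author's own statement) =====
-- stated objective: alternative
-- what changed: Single positional scan of the lowered message testing all markers at each offset (startswith), instead of a separate full substring search per marker.
import Mathlib
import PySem

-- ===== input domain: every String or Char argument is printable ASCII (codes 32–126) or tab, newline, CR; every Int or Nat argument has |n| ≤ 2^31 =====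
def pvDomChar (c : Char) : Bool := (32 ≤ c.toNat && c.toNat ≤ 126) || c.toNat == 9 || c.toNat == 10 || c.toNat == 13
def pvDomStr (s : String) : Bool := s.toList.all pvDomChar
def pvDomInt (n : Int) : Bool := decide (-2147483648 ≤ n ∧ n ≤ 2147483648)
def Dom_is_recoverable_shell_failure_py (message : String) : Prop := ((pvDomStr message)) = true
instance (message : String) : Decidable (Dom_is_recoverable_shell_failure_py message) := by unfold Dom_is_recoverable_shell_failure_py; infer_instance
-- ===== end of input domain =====

-- B replaces the per-marker substring search with one positional scan of the lowered
-- message, testing all markers at each offset (objective: alternative, not faster).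

-- ===== PORT A =====
def is_recoverable_shell_failure_py (message : String) : Bool :=
  let normalized := PySem.Str.lower message
  ["command timed out", "device offline", "device unauthorized", "device not found",
   "closed", "connection reset", "cannot connect"].any
    (fun marker => PySem.Str.isIn marker normalized)

-- ===== PORT B =====
def pvMarkers : List (List Char) :=
  ["command timed out".toList, "device offline".toList, "device unauthorized".toList,
   "device not found".toList, "closed".toList, "connection reset".toList,
   "cannot connect".toList]

-- the loop 'for i in range(len(s)+1): if any(s.startswith(m, i) …)' as recursion on suffixes
def pvScan (cs : List Char) : Bool :=
  if pvMarkers.any (fun m => PySem.Chars.startswith cs m) then true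
  else
    match cs with
    | [] => false
    | _ :: t => pvScan t

def is_recoverable_shell_failure_py_alt (message : String) : Bool :=
  pvScan (PySem.Chars.lower message.toList)

-- ===== PRECONDITION & SPEC =====
def Spec_is_recoverable_shell_failure_py (message : String) (out : Bool) : Prop := out = is_recoverable_shell_failure_py_alt message
instance (message : String) (out : Bool) : Decidable (Spec_is_recoverable_shell_failure_py message out) := by unfold Spec_is_recoverable_shell_failure_py; infer_instance

-- ===== CLAIM (what is proved, stated in full; the proofs are below) =====
def Claim_equal_is_recoverable_shell_failure_py : Prop := ∀ (message : String), Dom_is_recoverable_shell_failure_py message → Spec_is_recoverable_shell_failure_py message (is_recoverable_shell_failure_py message)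

-- ===== LEMMAS AND PROOFS =====

lemma pvScan_iff (cs : List Char) :
    pvScan cs = true ↔ ∃ m ∈ pvMarkers, ∃ j, m <+: List.drop j cs := by
  induction cs with
  | nil =>
    rw [pvScan]
    constructor
    · intro h
      split at h
      · rename_i hm
        simp only [List.any_eq_true] at hm
        obtain ⟨m, hm, hsw⟩ := hm
        exact ⟨m, hm, 0, (PySem.Chars.startswith_iff _ _).mp hsw⟩
      · exact absurd h (by simp)
    · rintro ⟨m, hm, j, hp⟩
      rw [List.drop_nil] at hp
      have hsw : PySem.Chars.startswith [] m = true := (PySem.Chars.startswith_iff _ _).mpr hp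
      have hany : pvMarkers.any (fun m => PySem.Chars.startswith [] m) = true := by
        simp only [List.any_eq_true]; exact ⟨m, hm, hsw⟩
      simp [hany]
  | cons c t ih =>
    constructor
    · intro h
      rw [pvScan] at h
      split at h
      · rename_i hm
        simp only [List.any_eq_true] at hm
        obtain ⟨m, hm, hsw⟩ := hm
        exact ⟨m, hm, 0, (PySem.Chars.startswith_iff _ _).mp hsw⟩
      · obtain ⟨m, hm, j, hp⟩ := ih.mp h
        exact ⟨m, hm, j + 1, by simpa using hp⟩
    · rintro ⟨m, hm, j, hp⟩
      rw [pvScan]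
      split
      · rfl
      · rename_i hany
        cases j with
        | zero =>
          rw [List.drop_zero] at hp
          have hsw : pvMarkers.any (fun m => PySem.Chars.startswith (c :: t) m) = true := by
            simp only [List.any_eq_true]
            exact ⟨m, hm, (PySem.Chars.startswith_iff _ _).mpr hp⟩
          exact absurd hsw hany
        | succ j' =>
          exact ih.mpr ⟨m, hm, j', by simpa using hp⟩

lemma pvScan_eq_any (cs : List Char) :
    pvScan cs = pvMarkers.any (fun m => PySem.Chars.isIn m cs) := by
  rw [Bool.eq_iff_iff, pvScan_iff, List.any_eq_true]
  constructor
  · rintro ⟨m, hm, j, hp⟩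
    exact ⟨m, hm, (PySem.Chars.exists_prefix_drop_iff_isIn m cs).mp ⟨j, hp⟩⟩
  · rintro ⟨m, hm, hin⟩
    obtain ⟨j, hp⟩ := (PySem.Chars.exists_prefix_drop_iff_isIn m cs).mpr hin
    exact ⟨m, hm, j, hp⟩

-- ===== VERDICT (by name: the statement is the Claim_ definition above) =====
theorem is_recoverable_shell_failure_py_spec : Claim_equal_is_recoverable_shell_failure_py := by
  intro message _
  show _ = _
  simp only [is_recoverable_shell_failure_py, is_recoverable_shell_failure_py_alt,
    pvScan_eq_any, pvMarkers, List.any_cons, List.any_nil,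
    PySem.Str.isIn, PySem.Str.toList_lower]
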